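-- pv_equiv track=rewrite | github.com/ladokp/aoc2021 | solution/aoc_day_08.py | _parse
-- ===== SOURCE A (Python) =====
-- def _parse(puzzle_input):
--     """Parse input"""
--     inputs = []
--     outputs = []
--     for line in puzzle_input.split("\n"):
--         input_str, output_str = line.split(" | ")
--         inputs.append([input_ for input_ in input_str.split()])
--         outputs.append([output_ for output_ in output_str.split()])
--     return inputs, outputs
-- ===== SOURCE B (Python) =====
-- def _parse(puzzle_input):
--     """Parse input"""
--     def rec(lines):
--         if not lines:
--             return [], []
--         line = lines[0]
--         cut = line.index(" | ")
--         ins, outs = rec(lines[1:])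
--         return [line[:cut].split()] + ins, [line[cut + 3:].split()] + outs
--
--     return rec(puzzle_input.split("\n"))
-- ===== Notes on version B (the rewrite author's own statement) =====
-- stated objective: alternative
-- what changed: B is recursive instead of iterative and cuts each line with str.partition(' | ') (find the separator once, slice) instead of A's two-way unpack of str.split, consing the two result lists on the way out of the recursion instead of appending to two accumulators.
import Mathlib
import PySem

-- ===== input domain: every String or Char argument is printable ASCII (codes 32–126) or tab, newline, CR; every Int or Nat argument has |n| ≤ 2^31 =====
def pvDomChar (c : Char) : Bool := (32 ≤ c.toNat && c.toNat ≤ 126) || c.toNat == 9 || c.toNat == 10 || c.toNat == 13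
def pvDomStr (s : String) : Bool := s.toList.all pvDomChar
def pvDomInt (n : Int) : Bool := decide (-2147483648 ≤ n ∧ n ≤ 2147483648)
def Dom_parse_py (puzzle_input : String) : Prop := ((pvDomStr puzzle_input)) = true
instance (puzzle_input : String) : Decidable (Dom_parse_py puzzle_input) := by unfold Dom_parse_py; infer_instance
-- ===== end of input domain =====

-- B parses recursively: each line is cut by index(" | ") + two slices instead of the
-- two-way unpack of split, and results are built by consing on the way out of the recursion
-- instead of A's loop appending to two accumulators; same cost, different decomposition.


-- ===== PORT A =====
-- literal port of A: one loop over the lines, appending to the two accumulators.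
-- Python's 'input_str, output_str = line.split(" | ")' raises ValueError unless the split has
-- exactly two parts; Pre_parse_py excludes those inputs (getD only makes the port total).
def parse_py (puzzle_input : String) : List (List String) × List (List String) :=
  ((PySem.Str.split? puzzle_input "\n").getD []).foldl
    (fun acc line =>
      let parts := (PySem.Str.split? line " | ").getD []
      (acc.1 ++ [PySem.Str.split₀ (parts.getD 0 "")],
       acc.2 ++ [PySem.Str.split₀ (parts.getD 1 "")]))
    ([], [])

-- ===== PORT B =====
-- per-line cut: 'cut = line.index(" | ")' then the two slices line[:cut], line[cut+3:].
-- Python's .index raises ValueError when find = -1; Pre_parse_py excludes those inputs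
-- (the slices below are applied to find's raw result only to keep the port total there).
def pvIndexCut (line : String) : String × String :=
  let cs := line.toList
  let i := PySem.Str.find line " | "
  (String.ofList (PySem.List.slice cs none (some i)),
   String.ofList (PySem.List.slice cs (some (i + 3)) none))

-- port of B's inner 'rec': structural recursion over the lines, consing the two results.
def parse_py_alt_rec (lines : List String) : List (List String) × List (List String) :=
  match lines with
  | [] => ([], [])
  | line :: rest =>
    let p := pvIndexCut line
    let r := parse_py_alt_rec rest
    (PySem.Str.split₀ p.1 :: r.1, PySem.Str.split₀ p.2 :: r.2)

def parse_py_alt (puzzle_input : String) : List (List String) × List (List String) :=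
  parse_py_alt_rec ((PySem.Str.split? puzzle_input "\n").getD [])

-- ===== PRECONDITION & SPEC =====
-- Pre_ excludes exactly the inputs where Python A raises ValueError from the two-way
-- unpack: some line whose split on " | " does not have exactly two parts.
def Pre_parse_py (puzzle_input : String) : Prop :=
  ∀ line ∈ (PySem.Str.split? puzzle_input "\n").getD [],
    ((PySem.Str.split? line " | ").getD []).length = 2
instance (puzzle_input : String) : Decidable (Pre_parse_py puzzle_input) := by
  unfold Pre_parse_py; infer_instance
def pvWitness_parse_py : String := "ab cd | ef\ngh | ij kl"
def Spec_parse_py (puzzle_input : String) (out : List (List String) × List (List String)) : Prop := out = parse_py_alt puzzle_input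
instance (puzzle_input : String) (out : List (List String) × List (List String)) : Decidable (Spec_parse_py puzzle_input out) := by unfold Spec_parse_py; infer_instance

-- ===== CLAIM (what is proved, stated in full; the proofs are below) =====
def Claim_equal_parse_py : Prop := ∀ (puzzle_input : String), Dom_parse_py puzzle_input → Pre_parse_py puzzle_input → Spec_parse_py puzzle_input (parse_py puzzle_input)

-- ===== LEMMAS AND PROOFS =====

theorem pv_find_go_offset (sub l : List Char) (k : Nat) :
    PySem.Chars.find.go sub l k =
      if PySem.Chars.find.go sub l 0 = -1 then -1
      else PySem.Chars.find.go sub l 0 + k := by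
  induction l generalizing k with
  | nil =>
    simp only [PySem.Chars.find.go]
    by_cases h : sub.isEmpty <;> simp [h]
  | cons c rest ih =>
    simp only [PySem.Chars.find.go]
    by_cases hp : sub.isPrefixOf (c :: rest) = true
    · simp [hp]
    · rw [if_neg hp, if_neg hp, ih (k+1), ih (0+1)]
      have hnn : -1 ≤ PySem.Chars.find rest sub := PySem.Chars.neg_one_le_find rest sub
      simp only [PySem.Chars.find] at hnn
      split_ifs <;> first | (push_cast at *; omega) | simp_all

theorem pv_find_nil (sep : List Char) (hsep : sep ≠ []) : PySem.Chars.find [] sep = -1 := by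
  simp [PySem.Chars.find, PySem.Chars.find.go, List.isEmpty_iff, hsep]

theorem pv_find_cons (sep : List Char) (c : Char) (rest : List Char) :
    PySem.Chars.find (c :: rest) sep =
      if sep.isPrefixOf (c :: rest) = true then 0
      else if PySem.Chars.find rest sep = -1 then -1 else PySem.Chars.find rest sep + 1 := by
  simp only [PySem.Chars.find, PySem.Chars.find.go]
  by_cases hp : sep.isPrefixOf (c :: rest) = true
  · simp [hp]
  · rw [if_neg hp, if_neg hp, pv_find_go_offset sep rest (0+1)]
    split_ifs <;> simp

theorem pv_go_spec (sep : List Char) (hsep : sep ≠ []) :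
    ∀ (n : Nat) (l : List Char), l.length ≤ n → ∀ (fuel : Nat), l.length < fuel →
      ∀ (cur : List Char) (acc : List (List Char)),
    PySem.Chars.splitOn.go sep fuel l cur acc =
      acc.reverse ++
        (if PySem.Chars.find l sep = -1 then [cur.reverse ++ l]
         else (cur.reverse ++ l.take (PySem.Chars.find l sep).toNat) ::
              PySem.Chars.splitOn (l.drop ((PySem.Chars.find l sep).toNat + sep.length)) sep) := by
  intro n
  induction n with
  | zero =>
    intro l hl fuel hf cur acc
    have : l = [] := List.length_eq_zero_iff.mp (Nat.le_zero.mp hl)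
    subst this
    obtain ⟨f, rfl⟩ : ∃ f, fuel = f + 1 := ⟨fuel - 1, by omega⟩
    simp [PySem.Chars.splitOn.go, pv_find_nil sep hsep]
  | succ n ih =>
    intro l hl fuel hf cur acc
    obtain ⟨f, rfl⟩ : ∃ f, fuel = f + 1 := ⟨fuel - 1, by omega⟩
    match l with
    | [] => simp [PySem.Chars.splitOn.go, pv_find_nil sep hsep]
    | c :: rest =>
      have hsl : 1 ≤ sep.length := by
        cases sep with | nil => exact absurd rfl hsep | cons a b => simp
      simp only [PySem.Chars.splitOn.go]
      by_cases hp : sep.isPrefixOf (c :: rest) = true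
      · rw [if_pos hp]
        have hlen : ((c :: rest).drop sep.length).length ≤ n := by
          simp at hl ⊢; omega
        have hfu : ((c :: rest).drop sep.length).length < f := by
          simp at hf ⊢; omega
        rw [ih _ hlen f hfu [] (cur.reverse :: acc)]
        have hsplit : PySem.Chars.splitOn ((c :: rest).drop sep.length) sep =
            (if PySem.Chars.find ((c :: rest).drop sep.length) sep = -1
             then [((c :: rest).drop sep.length)]
             else (((c :: rest).drop sep.length).take
                     (PySem.Chars.find ((c :: rest).drop sep.length) sep).toNat) ::
                  PySem.Chars.splitOn (((c :: rest).drop sep.length).drop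
                     ((PySem.Chars.find ((c :: rest).drop sep.length) sep).toNat + sep.length)) sep) := by
          have := ih ((c :: rest).drop sep.length) hlen (((c :: rest).drop sep.length).length + 1)
            (by omega) [] []
          simpa [PySem.Chars.splitOn] using this
        rw [pv_find_cons sep c rest, if_pos hp]
        simp only [List.reverse_nil, List.nil_append, ← hsplit]
        simp
      · rw [if_neg hp]
        have hlen : rest.length ≤ n := by simp at hl; omega
        have hfu : rest.length < f := by simp at hf; omega
        rw [ih rest hlen f hfu (c :: cur) acc]
        rw [pv_find_cons sep c rest, if_neg hp]
        have hnn : -1 ≤ PySem.Chars.find rest sep := PySem.Chars.neg_one_le_find rest sep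
        by_cases h0 : PySem.Chars.find rest sep = -1
        · simp [h0]
        · have hpos : 0 ≤ PySem.Chars.find rest sep := by omega
          have h1 : ¬ (PySem.Chars.find rest sep + 1 = -1) := by omega
          rw [if_neg h0, if_neg h0, if_neg h1]
          have htn : (PySem.Chars.find rest sep + 1).toNat
              = (PySem.Chars.find rest sep).toNat + 1 := by omega
          have hd : (PySem.Chars.find rest sep).toNat + 1 + sep.length
              = ((PySem.Chars.find rest sep).toNat + sep.length) + 1 := by omega
          simp [htn, hd, List.drop_succ_cons]

theorem pv_splitOn_cons (l sep : List Char) (hsep : sep ≠ []) :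
    PySem.Chars.splitOn l sep =
      if PySem.Chars.find l sep = -1 then [l]
      else l.take (PySem.Chars.find l sep).toNat ::
           PySem.Chars.splitOn (l.drop ((PySem.Chars.find l sep).toNat + sep.length)) sep := by
  have := pv_go_spec sep hsep l.length l (le_refl _) (l.length + 1) (by omega) [] []
  simpa [PySem.Chars.splitOn] using this

theorem pv_splitOn_ne_nil (l sep : List Char) (hsep : sep ≠ []) :
    PySem.Chars.splitOn l sep ≠ [] := by
  rw [pv_splitOn_cons l sep hsep]; split_ifs <;> simp

theorem pv_line_agree (line : String)
    (h : ((PySem.Str.split? line " | ").getD []).length = 2) :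
    (PySem.Str.split₀ (((PySem.Str.split? line " | ").getD []).getD 0 ""),
     PySem.Str.split₀ (((PySem.Str.split? line " | ").getD []).getD 1 "")) =
    (PySem.Str.split₀ (pvIndexCut line).1,
     PySem.Str.split₀ (pvIndexCut line).2) := by
  have hS : (" | " : String).toList = [' ', '|', ' '] := by decide
  have hsep : ([' ', '|', ' '] : List Char) ≠ [] := by decide
  have hnn : -1 ≤ PySem.Chars.find line.toList [' ', '|', ' '] :=
    PySem.Chars.neg_one_le_find _ _
  simp only [PySem.Str.split?, PySem.Chars.split?, hS, List.isEmpty_iff, if_neg hsep,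
    Option.map_some, Option.getD_some] at h ⊢
  rw [pv_splitOn_cons _ _ hsep] at h ⊢
  by_cases h0 : PySem.Chars.find line.toList [' ', '|', ' '] = -1
  · simp [h0] at h
  · have hpos : 0 ≤ PySem.Chars.find line.toList [' ', '|', ' '] := by omega
    rw [if_neg h0] at h ⊢
    rw [pv_splitOn_cons _ _ hsep] at h ⊢
    by_cases h1 : PySem.Chars.find
        (line.toList.drop ((PySem.Chars.find line.toList [' ', '|', ' ']).toNat + 3))
        [' ', '|', ' '] = -1
    · rw [show ([' ', '|', ' '] : List Char).length = 3 from rfl] at h ⊢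
      rw [if_pos h1] at h ⊢
      simp only [pvIndexCut, PySem.Str.find_eq, hS]
      rw [PySem.List.slice_to _ hpos, PySem.List.slice_from _ (by omega)]
      simp
      congr 3
      omega
    · rw [show ([' ', '|', ' '] : List Char).length = 3 from rfl] at h
      rw [if_neg h1] at h
      have hne := pv_splitOn_ne_nil
        ((line.toList.drop ((PySem.Chars.find line.toList [' ', '|', ' ']).toNat + 3)).drop
          ((PySem.Chars.find (line.toList.drop
              ((PySem.Chars.find line.toList [' ', '|', ' ']).toNat + 3)) [' ', '|', ' ']).toNat
            + 3)) _ hsep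
      simp only [List.drop_drop] at hne
      simp at h
      exact absurd h hne

-- the loop shape: A's dual-append foldl equals B's consing recursion, given per-line agreement.
theorem pv_fold_eq_rec (lines : List String) (i o : List (List String))
    (h : ∀ line ∈ lines, ((PySem.Str.split? line " | ").getD []).length = 2) :
    lines.foldl
      (fun acc line =>
        let parts := (PySem.Str.split? line " | ").getD []
        (acc.1 ++ [PySem.Str.split₀ (parts.getD 0 "")],
         acc.2 ++ [PySem.Str.split₀ (parts.getD 1 "")]))
      (i, o)
      = (i ++ (parse_py_alt_rec lines).1, o ++ (parse_py_alt_rec lines).2) := by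
  induction lines generalizing i o with
  | nil => simp [parse_py_alt_rec]
  | cons line rest ih =>
    have hl := pv_line_agree line (h line (by simp))
    have h1 := congrArg Prod.fst hl
    have h2 := congrArg Prod.snd hl
    simp only at h1 h2
    simp only [List.foldl_cons, parse_py_alt_rec]
    rw [ih _ _ (fun l hm => h l (by simp [hm]))]
    simp only [List.getD] at h1 h2
    simp [h1, h2]

-- ===== VERDICT (by name: the statement is the Claim_ definition above) =====
theorem parse_py_spec : Claim_equal_parse_py := by
  intro s _ hpre
  unfold Spec_parse_py parse_py parse_py_alt
  exact pv_fold_eq_rec _ [] [] hpre
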